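-- pv_equiv track=rewrite | github.com/PlumpMath/ClausewitzBlenderPlugin | import-export-clausewitz/utils.py | TransposeCoordinateArray
-- ===== SOURCE A (Python) =====
-- def my_range(start, end, step):
--     while start <= end:
--         yield start
--         start += step
--
-- def TransposeCoordinateArray(data):
--     result = []
--
--     if len(data) % 3 == 0:
--         for i in my_range(0, len(data) - 3, 3):
--             result.append((data[i], data[i + 1], data[i + 2]))
--
--         return result
--     else:
--         return result
-- ===== SOURCE B (Python) =====
-- def TransposeCoordinateArray(data):
--     if len(data) % 3:
--         return []
--     it = iter(data)
--     return list(zip(it, it, it))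
-- ===== Notes on version B (the rewrite author's own statement) =====
-- stated objective: idiomatic
-- what changed: Replaces the custom my_range generator with index stepping and three indexed reads by the standard zip-over-one-iterator grouper idiom, consuming the list three elements at a time with no indexing.
import Mathlib
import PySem

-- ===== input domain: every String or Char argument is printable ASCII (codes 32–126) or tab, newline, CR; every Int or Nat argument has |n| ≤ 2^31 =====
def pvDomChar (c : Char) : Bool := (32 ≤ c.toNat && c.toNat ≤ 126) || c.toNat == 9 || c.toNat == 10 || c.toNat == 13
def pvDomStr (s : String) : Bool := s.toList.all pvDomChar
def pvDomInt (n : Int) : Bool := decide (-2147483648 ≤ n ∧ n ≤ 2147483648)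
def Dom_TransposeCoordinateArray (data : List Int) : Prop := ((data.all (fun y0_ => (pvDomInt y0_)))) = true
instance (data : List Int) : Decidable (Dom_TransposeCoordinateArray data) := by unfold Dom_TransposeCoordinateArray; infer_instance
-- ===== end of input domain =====

-- ===== PORT A =====
-- B replaces the index-stepping my_range loop by the zip-over-one-iterator grouper idiom (idiomatic; same cost).
-- A's loop: 'for i in my_range(0, len(data)-3, 3): result.append((data[i], data[i+1], data[i+2]))'.
-- data[i] is in range whenever the loop guard holds (len % 3 == 0 and i ≤ len-3), so the '.getD 0'
-- defaults below are never reached (the port is exact; A never raises).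
def pvALoop (data : List Int) (i endI : Int) (acc : List (Int × Int × Int)) : List (Int × Int × Int) :=
  if i ≤ endI then
    pvALoop data (i + 3) endI
      (acc ++ [(((PySem.List.pyGet? data i).getD 0),
                ((PySem.List.pyGet? data (i + 1)).getD 0),
                ((PySem.List.pyGet? data (i + 2)).getD 0))])
  else acc
termination_by (endI + 1 - i).toNat
decreasing_by omega

def TransposeCoordinateArray (data : List Int) : List (Int × Int × Int) :=
  if (data.length : Int) % 3 = 0 then
    pvALoop data 0 ((data.length : Int) - 3) []
  else []

-- ===== PORT B =====
-- list(zip(it, it, it)) on a single iterator consumes the list three elements at a time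
-- (stops as soon as fewer than three remain — unreachable leftover under the % 3 guard).
def pvZip3 : List Int → List (Int × Int × Int)
  | a :: b :: c :: t => (a, b, c) :: pvZip3 t
  | _ => []

def TransposeCoordinateArray_alt (data : List Int) : List (Int × Int × Int) :=
  if (data.length : Int) % 3 ≠ 0 then [] else pvZip3 data

-- ===== PRECONDITION & SPEC =====
def Spec_TransposeCoordinateArray (data : List Int) (out : List (Int × Int × Int)) : Prop := out = TransposeCoordinateArray_alt data
instance (data : List Int) (out : List (Int × Int × Int)) : Decidable (Spec_TransposeCoordinateArray data out) := by unfold Spec_TransposeCoordinateArray; infer_instance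

-- ===== CLAIM (what is proved, stated in full; the proofs are below) =====
def Claim_equal_TransposeCoordinateArray : Prop := ∀ (data : List Int), Dom_TransposeCoordinateArray data → Spec_TransposeCoordinateArray data (TransposeCoordinateArray data)

-- ===== LEMMAS AND PROOFS =====
-- Invariant: started at index pre.length over pre ++ rest with rest.length % 3 = 0,
-- A's loop appends exactly the triples pvZip3 rest.
lemma pvALoop_key (rest : List Int) : ∀ (pre : List Int) (acc : List (Int × Int × Int)),
    rest.length % 3 = 0 →
    pvALoop (pre ++ rest) (pre.length : Int) ((pre.length : Int) + (rest.length : Int) - 3) acc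
      = acc ++ pvZip3 rest := by
  induction rest using pvZip3.induct with
  | case1 a b c t ih =>
    intro pre acc h
    rw [pvALoop]
    have hget0 : (pre ++ a :: b :: c :: t)[pre.length]? = some a := by
      simp
    have hget1 : (pre ++ a :: b :: c :: t)[pre.length + 1]? = some b := by
      rw [List.getElem?_append_right (by omega)]
      simp
    have hget2 : (pre ++ a :: b :: c :: t)[pre.length + 2]? = some c := by
      rw [List.getElem?_append_right (by omega)]
      simp
    have e1 : ((pre.length : Int) + 1) = ((pre.length + 1 : Nat) : Int) := by push_cast; ring
    have e2 : ((pre.length : Int) + 2) = ((pre.length + 2 : Nat) : Int) := by push_cast; ring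
    rw [if_pos (by simp; omega)]
    rw [e1, e2]
    rw [PySem.List.pyGet?_natCast, PySem.List.pyGet?_natCast, PySem.List.pyGet?_natCast]
    rw [hget0, hget1, hget2]
    have hre : pre ++ a :: b :: c :: t = (pre ++ [a, b, c]) ++ t := by simp
    have hlen : ((pre ++ [a, b, c]).length : Int) = (pre.length : Int) + 3 := by simp
    have := ih (pre ++ [a, b, c]) (acc ++ [(a, b, c)])
      (by simp only [List.length_cons] at h; omega)
    rw [hre]
    rw [hlen] at this
    have harith : (pre.length : Int) + 3 + (t.length : Int) - 3
        = (pre.length : Int) + ((a :: b :: c :: t).length : Int) - 3 := by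
      simp; ring
    rw [harith] at this
    simpa [pvZip3] using this
  | case2 x hx =>
    intro pre acc h
    rcases x with _ | ⟨a, _ | ⟨b, _ | ⟨c, t⟩⟩⟩
    · rw [pvALoop]
      simp [pvZip3]
    · simp at h
    · simp at h
    · exact absurd rfl (hx a b c t)

-- ===== VERDICT (by name: the statement is the Claim_ definition above) =====
theorem TransposeCoordinateArray_spec : Claim_equal_TransposeCoordinateArray := by
  intro data _
  unfold Spec_TransposeCoordinateArray TransposeCoordinateArray TransposeCoordinateArray_alt
  by_cases h : (data.length : Int) % 3 = 0
  · rw [if_pos h, if_neg (by simpa using h)]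
    have := pvALoop_key data [] [] (by omega)
    simpa using this
  · rw [if_neg h, if_pos (by simpa using h)]
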